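-- pv_equiv track=rewrite | github.com/traceopt-ai/traceml | src/traceml/renderers/step_time/compute.py | _common_steps
-- ===== SOURCE A (Python) =====
-- from typing import Any, Dict, List, Optional, Sequence, Tuple
--
-- def _common_steps(
--     per_rank_steps: Dict[int, Dict[int, Dict[str, Any]]],
--     completed_step: int,
--     window_size: int,
-- ) -> List[int]:
--     """
--     Return the last common suffix of step ids across all available ranks.
--     """
--     maps = list(per_rank_steps.values())
--     if not maps:
--         return []
--
--     out: List[int] = []
--     for s in range(int(completed_step), -1, -1):
--         if all(s in m for m in maps):
--             out.append(s)
--             if len(out) >= int(window_size):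
--                 break
--     out.reverse()
--     return out
-- ===== SOURCE B (Python) =====
-- from typing import Any, Dict, List
--
--
-- def _common_steps(
--     per_rank_steps: Dict[int, Dict[int, Dict[str, Any]]],
--     completed_step: int,
--     window_size: int,
-- ) -> List[int]:
--     """
--     Return the last common suffix of step ids across all available ranks.
--
--     Instead of counting down over every integer in [0, completed_step],
--     intersect the ranks' step-id key sets, sort the eligible ids, and
--     slice off the last window_size of them.
--     """
--     maps = list(per_rank_steps.values())
--     if not maps:
--         return []
--     if window_size <= 0:
--         return []
--     first, rest = maps[0], maps[1:]
--     eligible = sorted(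
--         s for s in first
--         if 0 <= s <= completed_step and all(s in m for m in rest)
--     )
--     return eligible[-window_size:]
-- ===== Notes on version B (the rewrite author's own statement) =====
-- stated objective: alternative
-- what changed: A counts down over every integer from completed_step to 0 probing all rank maps at each integer; B intersects the ranks' step-id key sets (iterating only the first rank's keys), sorts the eligible ids ascending and slices off the last window_size of them.
-- intended difference: When window_size <= 0 and at least one step id in [0, completed_step] is common to all (non-zero) ranks, A's break-after-append loop still returns one step while B returns the empty list, the intended value for a non-positive window. — e.g. on _common_steps([(0, [(0, [])])], 0, 0): A returns [0], B returns []
import Mathlib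
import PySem

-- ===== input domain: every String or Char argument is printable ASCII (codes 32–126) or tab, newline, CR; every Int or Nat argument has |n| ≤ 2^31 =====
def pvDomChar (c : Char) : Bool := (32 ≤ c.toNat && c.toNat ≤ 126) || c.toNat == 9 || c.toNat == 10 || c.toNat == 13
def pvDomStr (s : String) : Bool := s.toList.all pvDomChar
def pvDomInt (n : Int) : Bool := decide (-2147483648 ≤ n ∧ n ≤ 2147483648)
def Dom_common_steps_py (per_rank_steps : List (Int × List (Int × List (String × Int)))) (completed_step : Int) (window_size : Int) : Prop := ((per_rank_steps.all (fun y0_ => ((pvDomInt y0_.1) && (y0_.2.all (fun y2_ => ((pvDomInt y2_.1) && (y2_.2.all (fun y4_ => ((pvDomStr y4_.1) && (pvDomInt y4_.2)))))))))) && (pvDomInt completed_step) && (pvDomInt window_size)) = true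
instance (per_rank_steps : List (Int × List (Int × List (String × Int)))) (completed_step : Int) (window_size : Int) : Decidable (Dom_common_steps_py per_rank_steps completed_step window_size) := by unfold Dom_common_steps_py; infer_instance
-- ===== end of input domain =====

-- B replaces A's countdown over every integer in [0, completed_step] by filtering the first
-- rank's step-id keys against the other ranks, sorting, and slicing the last window_size
-- (objective: alternative algorithm). B intentionally returns [] for a non-positive window
-- where A's break-after-append loop still returns one step; see D_common_steps_py below.

-- ===== PORT A =====
-- 's in m' on an inner dict (key membership)
def pvHasKeyA (m : List (Int × List (String × Int))) (s : Int) : Bool :=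
  (PySem.Dict.ofList m).contains s

-- A's countdown loop, with its append-then-break shape
def pvALoop (maps : List (List (Int × List (String × Int)))) (ws : Int)
    (out : List Int) : List Int → List Int
  | [] => out
  | s :: rest =>
    if maps.all (fun m => pvHasKeyA m s) then
      if ws ≤ ((out ++ [s]).length : Int) then out ++ [s]
      else pvALoop maps ws (out ++ [s]) rest
    else pvALoop maps ws out rest

def common_steps_py (per_rank_steps : List (Int × List (Int × List (String × Int)))) (completed_step : Int) (window_size : Int) : List Int :=
  let maps := (PySem.Dict.ofList per_rank_steps).values
  if maps = [] then []
  else (pvALoop maps window_size [] (PySem.List.pyRange completed_step (-1) (-1))).reverse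

-- ===== PORT B =====
def common_steps_py_alt (per_rank_steps : List (Int × List (Int × List (String × Int)))) (completed_step : Int) (window_size : Int) : List Int :=
  match (PySem.Dict.ofList per_rank_steps).values with
  | [] => []
  | first :: rest =>
    if window_size ≤ 0 then []
    else
      let eligible := PySem.List.sorted
        (((PySem.Dict.ofList first).keys).filter
          (fun s => decide (0 ≤ s) && decide (s ≤ completed_step) &&
                    rest.all (fun m => (PySem.Dict.ofList m).contains s)))
        (fun x => x)
      PySem.List.slice eligible (some (-window_size)) none

-- ===== PRECONDITION & SPEC =====

-- When window_size ≤ 0, some rank is present and some step id in [0, completed_step] is common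
-- to all ranks, A returns a single step (its break fires only after the first append) while B
-- returns [], the intended value for a non-positive window.
def D_common_steps_py (per_rank_steps : List (Int × List (Int × List (String × Int)))) (completed_step : Int) (window_size : Int) : Prop :=
  window_size ≤ 0 ∧ per_rank_steps ≠ [] ∧
  ∃ e ∈ per_rank_steps.flatMap Prod.snd, 0 ≤ e.1 ∧ e.1 ≤ completed_step ∧
    per_rank_steps.all fun r =>
      (per_rank_steps.reverse.find? (·.1 == r.1)).any (·.2.any (·.1 == e.1))

instance (per_rank_steps : List (Int × List (Int × List (String × Int)))) (completed_step : Int) (window_size : Int) : Decidable (D_common_steps_py per_rank_steps completed_step window_size) := by unfold D_common_steps_py; infer_instance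

def Spec_common_steps_py (per_rank_steps : List (Int × List (Int × List (String × Int)))) (completed_step : Int) (window_size : Int) (out : List Int) : Prop := ¬ D_common_steps_py per_rank_steps completed_step window_size → out = common_steps_py_alt per_rank_steps completed_step window_size
instance (per_rank_steps : List (Int × List (Int × List (String × Int)))) (completed_step : Int) (window_size : Int) (out : List Int) : Decidable (Spec_common_steps_py per_rank_steps completed_step window_size out) := by unfold Spec_common_steps_py; infer_instance

def pvDiffWitness_common_steps_py : (List (Int × List (Int × List (String × Int)))) × Int × Int := ([(0, [(0, [])])], 0, 0)
def pvDiffWitnessOut_common_steps_py : (List Int) × (List Int) := ([0], [])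

-- ===== CLAIM (what is proved, stated in full; the proofs are below) =====
def Claim_unchanged_common_steps_py : Prop := ∀ (per_rank_steps : List (Int × List (Int × List (String × Int)))) (completed_step : Int) (window_size : Int), Dom_common_steps_py per_rank_steps completed_step window_size → Spec_common_steps_py per_rank_steps completed_step window_size (common_steps_py per_rank_steps completed_step window_size)
def Claim_changed_common_steps_py : Prop := Dom_common_steps_py (pvDiffWitness_common_steps_py.1) (pvDiffWitness_common_steps_py.2.1) (pvDiffWitness_common_steps_py.2.2) ∧ D_common_steps_py (pvDiffWitness_common_steps_py.1) (pvDiffWitness_common_steps_py.2.1) (pvDiffWitness_common_steps_py.2.2) ∧ common_steps_py (pvDiffWitness_common_steps_py.1) (pvDiffWitness_common_steps_py.2.1) (pvDiffWitness_common_steps_py.2.2) = pvDiffWitnessOut_common_steps_py.1 ∧ common_steps_py_alt (pvDiffWitness_common_steps_py.1) (pvDiffWitness_common_steps_py.2.1) (pvDiffWitness_common_steps_py.2.2) = pvDiffWitnessOut_common_steps_py.2 ∧ pvDiffWitnessOut_common_steps_py.1 ≠ pvDiffWitnessOut_common_steps_py.2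
def Claim_exact_common_steps_py : Prop := ∀ (per_rank_steps : List (Int × List (Int × List (String × Int)))) (completed_step : Int) (window_size : Int), Dom_common_steps_py per_rank_steps completed_step window_size → D_common_steps_py per_rank_steps completed_step window_size → common_steps_py per_rank_steps completed_step window_size ≠ common_steps_py_alt per_rank_steps completed_step window_size

-- ===== LEMMAS AND PROOFS =====

-- A's loop collects the first elements passing the all-maps test, at least one, at most ws
theorem pvALoop_eq (maps : List (List (Int × List (String × Int)))) (ws : Int) :
    ∀ (lst out : List Int),
      pvALoop maps ws out lst =
        out ++ (lst.filter (fun s => maps.all (fun m => pvHasKeyA m s))).take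
          (max 1 (ws - out.length).toNat) := by
  intro lst
  induction lst with
  | nil => intro out; simp [pvALoop]
  | cons s rest ih =>
    intro out
    by_cases hP : maps.all (fun m => pvHasKeyA m s) = true
    · have hfc : List.filter (fun s => maps.all (fun m => pvHasKeyA m s)) (s :: rest)
          = s :: List.filter (fun s => maps.all (fun m => pvHasKeyA m s)) rest := by
        simp [hP]
      have htake : ∀ (f : List Int) (n : Nat), 1 ≤ n →
          List.take n (s :: f) = s :: List.take (n - 1) f := by
        intro f n hn
        obtain ⟨k, rfl⟩ : ∃ k, n = k + 1 := ⟨n - 1, by omega⟩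
        simp [List.take_succ_cons]
      by_cases hbrk : ws ≤ ((out ++ [s]).length : Int)
      · have h1 : max 1 (ws - (out.length : Int)).toNat = 1 := by
          simp only [List.length_append, List.length_cons, List.length_nil] at hbrk
          omega
        rw [hfc, h1, htake _ 1 (le_refl 1)]
        simp only [pvALoop, hP, if_true, if_pos hbrk]
        simp
      · have h2 : max 1 (ws - (out.length : Int)).toNat = (ws - (out.length : Int)).toNat := by
          simp only [List.length_append, List.length_cons, List.length_nil] at hbrk
          omega
        have hge : 1 ≤ (ws - (out.length : Int)).toNat := by
          simp only [List.length_append, List.length_cons, List.length_nil] at hbrk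
          omega
        have h3 : max 1 (ws - ((out ++ [s]).length : Int)).toNat
            = (ws - (out.length : Int)).toNat - 1 := by
          simp only [List.length_append, List.length_cons, List.length_nil] at hbrk ⊢
          omega
        simp only [pvALoop, hP, if_true, if_neg hbrk, ih, h3]
        rw [hfc, h2, htake _ _ hge]
        simp [List.append_assoc]
    · have hfc : List.filter (fun s => maps.all (fun m => pvHasKeyA m s)) (s :: rest)
          = List.filter (fun s => maps.all (fun m => pvHasKeyA m s)) rest := by
        simp [hP]
      simp only [pvALoop]
      rw [if_neg hP, hfc, ih]

theorem pv_mem_keys_update {κ ν : Type} [BEq κ] [LawfulBEq κ] (l : List (κ × ν))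
    (d : PySem.Dict κ ν) (k : κ) :
    k ∈ (PySem.Dict.update d l).keys → k ∈ d.keys ∨ k ∈ l.map Prod.fst := by
  induction l generalizing d with
  | nil => intro h; exact Or.inl h
  | cons p t ih =>
    intro h
    rcases ih (d.insert p.1 p.2) h with h' | h'
    · rcases (PySem.Dict.mem_keys_insert d p.1 k p.2).mp h' with h'' | h''
      · exact Or.inr (by simp [h''])
      · exact Or.inl h''
    · exact Or.inr (by simp at h' ⊢; tauto)

theorem pv_mem_values_update {κ ν : Type} [BEq κ] [LawfulBEq κ] (l : List (κ × ν))
    (d : PySem.Dict κ ν) (m : ν) :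
    m ∈ (PySem.Dict.update d l).values → m ∈ d.values ∨ ∃ k, (k, m) ∈ l := by
  induction l generalizing d with
  | nil => intro h; exact Or.inl h
  | cons p t ih =>
    intro h
    rcases ih (d.insert p.1 p.2) h with h' | h'
    · rcases PySem.Dict.mem_values_insert d p.1 p.2 m h' with h'' | h''
      · exact Or.inr ⟨p.1, by simp [h'']⟩
      · exact Or.inl h''
    · rcases h' with ⟨k, hk⟩; exact Or.inr ⟨k, by simp [hk]⟩

theorem pv_keys_update_mono {κ ν : Type} [BEq κ] [LawfulBEq κ] (l : List (κ × ν))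
    (d : PySem.Dict κ ν) (k : κ) :
    k ∈ d.keys → k ∈ (PySem.Dict.update d l).keys := by
  induction l generalizing d with
  | nil => exact fun h => h
  | cons p t ih =>
    intro h
    exact ih _ ((PySem.Dict.mem_keys_insert d p.1 k p.2).mpr (Or.inr h))

theorem pv_values_ofList_ne_nil (x : Int × List (Int × List (String × Int)))
    (l : List (Int × List (Int × List (String × Int)))) :
    (PySem.Dict.ofList (x :: l)).values ≠ [] := by
  have hk : x.1 ∈ (PySem.Dict.ofList (x :: l)).keys := by
    show x.1 ∈ (PySem.Dict.update PySem.Dict.empty (x :: l)).keys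
    have h : PySem.Dict.update PySem.Dict.empty (x :: l)
        = PySem.Dict.update (PySem.Dict.empty.insert x.1 x.2) l := by
      simp [PySem.Dict.update]
    rw [h]
    exact pv_keys_update_mono _ _ _
      ((PySem.Dict.mem_keys_insert _ x.1 x.1 x.2).mpr (Or.inl rfl))
  intro hv
  have hkeys : (PySem.Dict.ofList (x :: l)).keys = [] := by
    have h1 := congrArg List.length hv
    simp only [PySem.Dict.values, PySem.Dict.keys] at *
    simp at h1
    simp [h1]
  rw [hkeys] at hk
  exact absurd hk (List.not_mem_nil)


theorem pv_mem_keys_update_iff {κ ν : Type} [BEq κ] [LawfulBEq κ] (l : List (κ × ν))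
    (d : PySem.Dict κ ν) (k : κ) :
    k ∈ (PySem.Dict.update d l).keys ↔ k ∈ d.keys ∨ k ∈ l.map Prod.fst := by
  constructor
  · exact pv_mem_keys_update l d k
  · intro h
    rcases h with h | h
    · exact pv_keys_update_mono l d k h
    · induction l generalizing d with
      | nil => simp at h
      | cons p t ih =>
        simp only [List.map_cons, List.mem_cons] at h
        rcases h with h' | h'
        · exact pv_keys_update_mono t _ k
            ((PySem.Dict.mem_keys_insert d p.1 k p.2).mpr (Or.inl h'))
        · exact ih (d.insert p.1 p.2) h'

theorem pv_contains_ofList_iff {κ ν : Type} [BEq κ] [LawfulBEq κ] (l : List (κ × ν)) (k : κ) :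
    (PySem.Dict.ofList l).contains k = true ↔ k ∈ l.map Prod.fst := by
  rw [PySem.Dict.contains_iff_mem_keys]
  show k ∈ (PySem.Dict.update PySem.Dict.empty l).keys ↔ _
  rw [pv_mem_keys_update_iff]
  simp [PySem.Dict.empty, PySem.Dict.keys]

-- a dict built from an association list looks up the LAST binding of a key
theorem pv_get?_update_find {κ ν : Type} [BEq κ] [LawfulBEq κ] (l : List (κ × ν))
    (d : PySem.Dict κ ν) (k : κ) :
    (PySem.Dict.update d l).get? k =
      (match l.reverse.find? (fun r => r.1 == k) with
       | some r => some r.2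
       | none => d.get? k) := by
  induction l using List.reverseRecOn with
  | nil => simp [PySem.Dict.update]
  | append_singleton t x ih =>
    have hupd : PySem.Dict.update d (t ++ [x]) = (PySem.Dict.update d t).insert x.1 x.2 := by
      simp [PySem.Dict.update, List.foldl_append]
    rw [hupd, List.reverse_append]
    by_cases hx : x.1 = k
    · subst hx
      simp [PySem.Dict.get?_insert_self]
    · rw [PySem.Dict.get?_insert_of_ne (hne := fun h => hx h.symm), ih]
      simp [hx]

-- D_'s raw-list condition agrees with the dict reading of the input
theorem pv_commonKey_iff (p : List (Int × List (Int × List (String × Int)))) (s : Int) :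
    (p.all (fun r => (p.reverse.find? (fun q => q.1 == r.1)).any
      (fun m => m.2.any (fun x => x.1 == s)))) = true ↔
      ((PySem.Dict.ofList p).values).all
        (fun m => (PySem.Dict.ofList m).contains s) = true := by
  have hget : ∀ k, (PySem.Dict.ofList p).get? k =
      (match p.reverse.find? (fun r => r.1 == k) with
       | some r => some r.2
       | none => none) := by
    intro k
    have h0 : PySem.Dict.ofList p = PySem.Dict.update PySem.Dict.empty p := rfl
    rw [h0, pv_get?_update_find]
    cases List.find? (fun r => r.1 == k) p.reverse with
    | none => rfl
    | some r => rfl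
  have hnd := PySem.Dict.nodup_keys_ofList p
  constructor
  · intro h
    rw [List.all_eq_true]
    intro m hm
    rw [PySem.Dict.values_eq_map_keys _ hnd []] at hm
    obtain ⟨k, hk, hkm⟩ := List.mem_map.mp hm
    have hkp : k ∈ p.map Prod.fst := by
      have := pv_mem_keys_update p (PySem.Dict.empty) k hk
      simpa [PySem.Dict.empty, PySem.Dict.keys] using this
    obtain ⟨r, hr, hrk⟩ := List.mem_map.mp hkp
    have hfind : ∃ m', p.reverse.find? (fun r' => r'.1 == r.1) = some m' := by
      have : (p.reverse.find? (fun r' => r'.1 == r.1)).isSome := by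
        rw [List.find?_isSome]
        exact ⟨r, List.mem_reverse.mpr hr, by simp⟩
      exact ⟨_, Option.eq_some_of_isSome this⟩
    obtain ⟨m', hm'⟩ := hfind
    have hgr : (PySem.Dict.ofList p).get? r.1 = some m'.2 := by
      rw [hget r.1, hm']
    have hmem : s ∈ m'.2.map Prod.fst := by
      have hh := List.all_eq_true.mp h r hr
      rw [hm'] at hh
      simpa using hh
    have hmm : m = m'.2 := by
      rw [← hkm, ← hrk]
      rw [PySem.Dict.getD_eq_get?_getD, hgr]
      rfl
    rw [hmm, pv_contains_ofList_iff]
    exact hmem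
  · intro h
    rw [List.all_eq_true]
    intro r hr
    have hfind : ∃ m', p.reverse.find? (fun r' => r'.1 == r.1) = some m' := by
      have : (p.reverse.find? (fun r' => r'.1 == r.1)).isSome := by
        rw [List.find?_isSome]
        exact ⟨r, List.mem_reverse.mpr hr, by simp⟩
      exact ⟨_, Option.eq_some_of_isSome this⟩
    obtain ⟨m', hm'⟩ := hfind
    have hgr : (PySem.Dict.ofList p).get? r.1 = some m'.2 := by
      rw [hget r.1, hm']
    have hv : m'.2 ∈ (PySem.Dict.ofList p).values := by
      have hit := PySem.Dict.mem_items_of_get?_eq_some _ hgr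
      simp only [PySem.Dict.values]
      exact List.mem_map.mpr ⟨(r.1, m'.2), hit, rfl⟩
    have hc := List.all_eq_true.mp h _ hv
    rw [hm']
    rw [pv_contains_ofList_iff] at hc
    simpa using hc

-- a step id common to all rank maps occurs among the input's inner entries
theorem pv_mem_flatMap_of_common (x : Int × List (Int × List (String × Int)))
    (p' : List (Int × List (Int × List (String × Int))))
    (first : List (Int × List (String × Int)))
    (rest : List (List (Int × List (String × Int)))) (s : Int)
    (hvr : (PySem.Dict.ofList (x :: p')).values = first :: rest)
    (hf : (PySem.Dict.ofList first).contains s = true) :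
    ∃ e ∈ (x :: p').flatMap Prod.snd, e.1 = s := by
  have hfv : first ∈ (PySem.Dict.ofList (x :: p')).values := by
    rw [hvr]; exact List.mem_cons_self
  have hfm : ∃ k, (k, first) ∈ x :: p' := by
    rcases pv_mem_values_update (x :: p') PySem.Dict.empty first hfv with h | h
    · simp [PySem.Dict.empty, PySem.Dict.values] at h
    · exact h
  obtain ⟨k, hk⟩ := hfm
  have hs : s ∈ first.map Prod.fst := by
    rcases pv_mem_keys_update first PySem.Dict.empty s
        ((PySem.Dict.contains_iff_mem_keys _ s).mp hf) with h | h
    · simp [PySem.Dict.empty, PySem.Dict.keys] at h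
    · exact h
  obtain ⟨e, he, he1⟩ := List.mem_map.mp hs
  exact ⟨e, List.mem_flatMap.mpr ⟨(k, first), hk, he⟩, he1⟩

-- B's sorted eligible list is the ascending version of A's filtered countdown range
theorem pv_sorted_eq (first : List (Int × List (String × Int)))
    (rest : List (List (Int × List (String × Int)))) (cs : Int) :
    PySem.List.sorted
      (((PySem.Dict.ofList first).keys).filter
        (fun s => decide (0 ≤ s) && decide (s ≤ cs) &&
                  rest.all (fun m => (PySem.Dict.ofList m).contains s)))
      (fun x => x) =
    (PySem.List.pyRange 0 (cs + 1) 1).filter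
      (fun s => (first :: rest).all (fun m => pvHasKeyA m s)) := by
  apply PySem.List.sorted_eq_of_perm_of_pairwise_lt
  · rw [List.perm_ext_iff_of_nodup
      (((PySem.List.nodup_pyRange_one _ _)).filter _)
      ((PySem.Dict.nodup_keys_ofList first).filter _)]
    intro a
    simp only [List.mem_filter, PySem.List.mem_pyRange_one, List.all_cons,
      Bool.and_eq_true, decide_eq_true_iff, pvHasKeyA,
      PySem.Dict.contains_iff_mem_keys]
    constructor
    · rintro ⟨⟨h0, hlt⟩, hf, hr⟩
      exact ⟨hf, ⟨h0, by omega⟩, hr⟩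
    · rintro ⟨hf, ⟨h0, hle⟩, hr⟩
      exact ⟨⟨h0, by omega⟩, hf, hr⟩
  · exact (PySem.List.pairwise_lt_pyRange_one 0 (cs + 1)).filter _

-- ===== VERDICT (by name: the statement is the Claim_ definition above) =====
theorem common_steps_py_spec : Claim_unchanged_common_steps_py := by
  intro p cs ws hdom
  unfold Spec_common_steps_py
  intro hnd
  rcases p with _ | ⟨x, p'⟩
  · rfl
  · obtain ⟨first, rest, hvr⟩ := List.exists_cons_of_ne_nil (pv_values_ofList_ne_nil x p')
    simp only [common_steps_py, common_steps_py_alt, hvr]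
    rw [if_neg (List.cons_ne_nil first rest)]
    by_cases hws : ws ≤ 0
    · rw [if_pos hws]
      have hF : (PySem.List.pyRange cs (-1) (-1)).filter
          (fun s => (first :: rest).all (fun m => pvHasKeyA m s)) = [] := by
        rw [List.filter_eq_nil_iff]
        intro s hs hPs
        obtain ⟨hlo, hhi⟩ := PySem.List.mem_pyRange_neg_one.mp hs
        apply hnd
        have hf : (PySem.Dict.ofList first).contains s = true := by
          simp only [List.all_cons, Bool.and_eq_true, pvHasKeyA] at hPs
          exact hPs.1
        obtain ⟨e, he, he1⟩ := pv_mem_flatMap_of_common x p' first rest s hvr hf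
        refine ⟨hws, List.cons_ne_nil x p', e, he, ?_, ?_, ?_⟩
        · omega
        · omega
        · rw [he1, pv_commonKey_iff, hvr]
          have hPs' := hPs
          simp only [pvHasKeyA] at hPs'
          exact hPs' 
      rw [pvALoop_eq, hF]
      simp
    · rw [if_neg hws]
      rw [pvALoop_eq, PySem.List.pyRange_neg_one_eq_reverse]
      have h01 : (-1 : Int) + 1 = 0 := by norm_num
      rw [h01, List.filter_reverse, pv_sorted_eq]
      have hcast : -ws = -((ws.toNat : Nat) : Int) := by omega
      rw [hcast, PySem.List.slice_from_neg_natCast _ _ (by omega)]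
      have hmax : max 1 (ws - (([] : List Int).length : Int)).toNat = ws.toNat := by
        simp; omega
      rw [hmax, List.take_reverse]
      simp
  
theorem common_steps_py_changed : Claim_changed_common_steps_py := by
  unfold Claim_changed_common_steps_py; decide

theorem common_steps_py_tight : Claim_exact_common_steps_py := by
  unfold Claim_exact_common_steps_py
  intro p cs ws hdom hd
  obtain ⟨hws, hp, e, hsmem, h0, hcs, hcomm⟩ := hd
  obtain ⟨x, p', rfl⟩ := List.exists_cons_of_ne_nil hp
  obtain ⟨first, rest, hvr⟩ := List.exists_cons_of_ne_nil (pv_values_ofList_ne_nil x p')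
  intro heq
  have hB : common_steps_py_alt (x :: p') cs ws = [] := by
    simp only [common_steps_py_alt, hvr]
    rw [if_pos hws]
  have hA : common_steps_py (x :: p') cs ws ≠ [] := by
    simp only [common_steps_py, hvr]
    rw [if_neg (List.cons_ne_nil first rest), pvALoop_eq]
    intro h
    have hs' : e.1 ∈ (PySem.List.pyRange cs (-1) (-1)).filter
        (fun t => (first :: rest).all (fun m => pvHasKeyA m t)) := by
      rw [List.mem_filter]
      refine ⟨PySem.List.mem_pyRange_neg_one.mpr ⟨by omega, hcs⟩, ?_⟩
      rw [pv_commonKey_iff, hvr] at hcomm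
      simp only [pvHasKeyA]
      exact hcomm
    have hlen : 1 ≤ ((PySem.List.pyRange cs (-1) (-1)).filter
        (fun t => (first :: rest).all (fun m => pvHasKeyA m t))).length :=
      List.length_pos_of_mem hs'
    have h2 : List.take (max 1 (ws - (([] : List Int).length : Int)).toNat)
        ((PySem.List.pyRange cs (-1) (-1)).filter
          (fun t => (first :: rest).all (fun m => pvHasKeyA m t))) = [] := by
      have h3 := congrArg List.reverse h
      simpa using h3
    have h4 := congrArg List.length h2
    simp only [List.length_take, List.length_nil] at h4
    omega
  exact hA (hB ▸ heq)
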